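-- pv_equiv track=rewrite | github.com/ASSERT-KTH/Mokav | experiments/pynguin/c4b/return-lst/generated_tests/src_99/4/src_99.py | func
-- ===== SOURCE A (Python) =====
-- def func(*args):
-- 	ret_values = []
--
-- 	n = int(args[0])
-- 	l = 0
-- 	for i in range(1, n):
-- 	    l += (i * (n - i))
-- 	ret_values.append((l + n))
--
-- 	return ret_values
-- ===== SOURCE B (Python) =====
-- def func(*args):
--     n = int(args[0])
--     if n > 1:
--         return [(n * n * n - n) // 6 + n]
--     return [n]
-- ===== Notes on version B (the rewrite author's own statement) =====
-- stated objective: faster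
-- what changed: Replaced the O(n) summation loop over range(1,n) by the closed form (n^3-n)/6 for sum i*(n-i).
import Mathlib
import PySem

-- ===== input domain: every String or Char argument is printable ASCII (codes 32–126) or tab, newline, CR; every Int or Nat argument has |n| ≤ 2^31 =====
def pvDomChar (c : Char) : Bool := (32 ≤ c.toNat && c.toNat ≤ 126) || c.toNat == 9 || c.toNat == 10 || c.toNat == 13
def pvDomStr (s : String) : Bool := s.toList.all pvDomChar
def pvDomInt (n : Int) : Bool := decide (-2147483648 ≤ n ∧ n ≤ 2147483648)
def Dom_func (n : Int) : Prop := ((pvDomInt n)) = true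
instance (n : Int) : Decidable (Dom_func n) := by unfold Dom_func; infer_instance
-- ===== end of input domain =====

-- B replaces A's O(n) summation loop by the closed form (n^3-n)/6 (objective: faster).

-- ===== PORT A =====
def func (n : Int) : List Int :=
  let l := (PySem.List.pyRange 1 n 1).foldl (fun l i => l + i * (n - i)) 0
  [l + n]

-- ===== PORT B =====
def func_alt (n : Int) : List Int :=
  if n > 1 then [PySem.Int.floordiv (n * n * n - n) 6 + n] else [n]

-- ===== PRECONDITION & SPEC =====
def Spec_func (n : Int) (out : List Int) : Prop := out = func_alt n
instance (n : Int) (out : List Int) : Decidable (Spec_func n out) := by unfold Spec_func; infer_instance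

-- ===== CLAIM (what is proved, stated in full; the proofs are below) =====
def Claim_equal_func : Prop := ∀ (n : Int), Dom_func n → Spec_func n (func n)

-- ===== LEMMAS AND PROOFS =====

theorem pv_foldl_eq_sum (g : Int → Int) : ∀ (xs : List Int) (init : Int),
    xs.foldl (fun l i => l + g i) init = init + (xs.map g).sum := by
  intro xs
  induction xs with
  | nil => simp
  | cons x xs ih => intro init; simp [List.foldl_cons, ih]; ring

theorem pv_gauss : ∀ (m : Nat),
    2 * ((List.range m).map (fun (k : Nat) => ((k : Int) + 1))).sum = (m : Int) * (m + 1) := by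
  intro m
  induction m with
  | zero => simp
  | succ m ih =>
    rw [List.range_succ]
    simp only [List.map_append, List.sum_append, List.map_cons, List.map_nil, List.sum_cons,
      List.sum_nil]
    push_cast
    linarith

theorem pv_key : ∀ (m : Nat),
    6 * ((List.range m).map (fun (k : Nat) => (1 + (k : Int)) * (((m : Int) + 1) - (1 + (k : Int))))).sum
      = (m : Int) * (m + 1) * (m + 2) := by
  intro m
  induction m with
  | zero => simp
  | succ m ih =>
    have hfe : (fun k : Nat => (1 + (k : Int)) * ((((m : Nat) + 1 : Nat) : Int) + 1 - (1 + k)))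
        = fun k : Nat => (1 + (k : Int)) * (((m : Int) + 1) - (1 + (k : Int))) + ((k : Int) + 1) := by
      funext k; push_cast; ring
    rw [hfe, PySem.List.sum_map_add_int, List.range_succ]
    simp only [List.map_append, List.sum_append, List.map_cons, List.map_nil, List.sum_cons,
      List.sum_nil]
    have hg := pv_gauss (m + 1)
    rw [List.range_succ] at hg
    simp only [List.map_append, List.sum_append, List.map_cons, List.map_nil, List.sum_cons,
      List.sum_nil] at hg
    push_cast at hg ⊢
    nlinarith [ih, hg]

-- ===== VERDICT (by name: the statement is the Claim_ definition above) =====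
theorem func_spec : Claim_equal_func := by
  unfold Claim_equal_func
  intro n _
  unfold Spec_func func func_alt
  by_cases h : n > 1
  · simp only [if_pos h]
    -- write n = m + 1
    obtain ⟨m, hm⟩ : ∃ m : Nat, n = (m : Int) + 1 := ⟨(n - 1).toNat, by omega⟩
    subst hm
    rw [PySem.List.pyRange_one, pv_foldl_eq_sum, List.map_map]
    have hsum := pv_key m
    have hmeq : ((m : Int) + 1 - 1).toNat = m := by omega
    rw [hmeq]
    have hcomp : ((fun i => i * ((m : Int) + 1 - i)) ∘ fun k : Nat => (1 : Int) + (k : Int))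
        = fun (k : Nat) => (1 + (k : Int)) * (((m : Int) + 1) - (1 + (k : Int))) := by
      funext k; simp
    rw [hcomp]
    have h6 : ((m : Int) + 1) * ((m : Int) + 1) * ((m : Int) + 1) - ((m : Int) + 1)
        = 6 * ((List.range m).map (fun (k : Nat) => (1 + (k : Int)) * (((m : Int) + 1) - (1 + (k : Int))))).sum := by
      rw [hsum]; ring
    rw [h6]
    rw [PySem.Int.floordiv_eq_ediv_of_pos (by norm_num)]
    rw [Int.mul_ediv_cancel_left _ (by norm_num)]
    simp
  · simp only [if_neg h]
    rw [PySem.List.pyRange_one_eq_nil (by omega)]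
    simp
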